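-- pv_equiv track=rewrite | github.com/imdayoung/algorithm-study | 프로그래머스/문자열/문자열 만들기.py | solution
-- ===== SOURCE A (Python) =====
-- def solution(s):
--     answer = ''
--     for char in s:
--         if char == " " or char.isdigit():
--             answer += char
--         elif (answer != '' and answer[-1] == " ") or answer == '':
--             answer += char.upper()
--         else:
--             answer += char.lower()
--     return answer
-- ===== SOURCE B (Python) =====
-- def solution(s):
--     return ' '.join(t[:1].upper() + t[1:].lower() for t in s.split(' '))
-- ===== Notes on version B (the rewrite author's own statement) =====
-- stated objective: simpler
-- what changed: Replaces the stateful character-by-character scan (which inspects the last character of the output built so far) with a one-liner: split the string on the space separator, capitalize each token as token[:1].upper()+token[1:].lower(), and rejoin the tokens.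
import Mathlib
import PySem

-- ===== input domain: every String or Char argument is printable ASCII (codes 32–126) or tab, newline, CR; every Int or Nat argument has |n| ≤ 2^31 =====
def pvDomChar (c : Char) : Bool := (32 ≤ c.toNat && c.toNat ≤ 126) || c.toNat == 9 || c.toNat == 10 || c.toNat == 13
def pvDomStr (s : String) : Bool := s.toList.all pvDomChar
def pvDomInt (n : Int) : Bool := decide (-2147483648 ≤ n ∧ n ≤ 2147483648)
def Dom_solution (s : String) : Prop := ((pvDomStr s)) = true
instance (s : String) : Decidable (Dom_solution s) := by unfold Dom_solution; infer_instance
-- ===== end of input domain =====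

-- B replaces A's stateful per-character scan by split-on-space / capitalize each token / rejoin (objective: simpler).

-- ===== PORT A =====
-- the loop body of A: space/digit kept, else upper after a space (or at the start), else lower
def solutionStep (answer : List Char) (c : Char) : List Char :=
  if c == ' ' || PySem.Chars.isdigit c then answer ++ [c]
  else if (decide (answer ≠ []) && (PySem.Chars.pyGet? answer (-1) == some ' ')) || decide (answer = []) then
    answer ++ [PySem.Chars.upperChar c]
  else answer ++ [PySem.Chars.lowerChar c]

def solution (s : String) : String :=
  String.ofList (s.toList.foldl solutionStep [])

-- ===== PORT B =====
-- t[:1].upper() + t[1:].lower()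
def capTok (t : List Char) : List Char :=
  PySem.Chars.upper (PySem.Chars.slice t none (some 1)) ++
  PySem.Chars.lower (PySem.Chars.slice t (some 1) none)

def solution_alt (s : String) : String :=
  String.ofList (PySem.Chars.join [' '] ((PySem.Chars.splitOn s.toList [' ']).map capTok))

-- ===== PRECONDITION & SPEC =====
def Spec_solution (s : String) (out : String) : Prop := out = solution_alt s
instance (s : String) (out : String) : Decidable (Spec_solution s out) := by unfold Spec_solution; infer_instance

-- ===== CLAIM (what is proved, stated in full; the proofs are below) =====
def Claim_equal_solution : Prop := ∀ (s : String), Dom_solution s → Spec_solution s (solution s)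

-- ===== LEMMAS AND PROOFS =====

-- split on a single space, as (first token, remaining tokens)
def splitSp : List Char → List Char × List (List Char)
  | [] => ([], [])
  | c :: cs =>
    let p := splitSp cs
    if c = ' ' then ([], p.1 :: p.2) else (c :: p.1, p.2)

-- the common intermediate: the output as a function of the input chars and a "capitalize next" flag
def fAB (b : Bool) : List Char → List Char
  | [] => []
  | c :: cs =>
    if c = ' ' then ' ' :: fAB true cs
    else (if b then PySem.Chars.upperChar c else PySem.Chars.lowerChar c) :: fAB false cs

theorem toNat_ofNat_valid (n : Nat) (h : n < 55296) : (Char.ofNat n).toNat = n := by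
  unfold Char.ofNat
  rw [dif_pos (Or.inl h)]
  simp [Char.ofNatAux, Char.toNat]

theorem upperChar_ne_space {c : Char} (hc : c ≠ ' ') : PySem.Chars.upperChar c ≠ ' ' := by
  unfold PySem.Chars.upperChar PySem.Chars.islower
  split_ifs with h
  · simp only [Bool.and_eq_true, decide_eq_true_eq, Char.le_def, UInt32.le_iff_toNat_le] at h
    intro he
    have h1 : 97 ≤ c.toNat := h.1
    have h2 : c.toNat ≤ 122 := h.2
    have h3 : (Char.ofNat (c.toNat - 32)).toNat = (' ' : Char).toNat := by rw [he]
    rw [toNat_ofNat_valid _ (by omega)] at h3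
    have h4 : (' ' : Char).toNat = 32 := rfl
    omega
  · exact hc

theorem lowerChar_ne_space {c : Char} (hc : c ≠ ' ') : PySem.Chars.lowerChar c ≠ ' ' := by
  unfold PySem.Chars.lowerChar PySem.Chars.isupper
  split_ifs with h
  · simp only [Bool.and_eq_true, decide_eq_true_eq, Char.le_def, UInt32.le_iff_toNat_le] at h
    intro he
    have h1 : 65 ≤ c.toNat := h.1
    have h2 : c.toNat ≤ 90 := h.2
    have h3 : (Char.ofNat (c.toNat + 32)).toNat = (' ' : Char).toNat := by rw [he]
    rw [toNat_ofNat_valid _ (by omega)] at h3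
    have h4 : (' ' : Char).toNat = 32 := rfl
    omega
  · exact hc

theorem upperChar_digit {c : Char} (hc : PySem.Chars.isdigit c = true) :
    PySem.Chars.upperChar c = c := by
  unfold PySem.Chars.isdigit at hc
  unfold PySem.Chars.upperChar PySem.Chars.islower
  simp only [Bool.and_eq_true, decide_eq_true_eq, Char.le_def, UInt32.le_iff_toNat_le] at hc ⊢
  have h9 : c.toNat ≤ 57 := hc.2
  split_ifs with h
  · exfalso; have : 97 ≤ c.toNat := h.1; omega
  · rfl

theorem lowerChar_digit {c : Char} (hc : PySem.Chars.isdigit c = true) :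
    PySem.Chars.lowerChar c = c := by
  unfold PySem.Chars.isdigit at hc
  unfold PySem.Chars.lowerChar PySem.Chars.isupper
  simp only [Bool.and_eq_true, decide_eq_true_eq, Char.le_def, UInt32.le_iff_toNat_le] at hc ⊢
  have h9 : c.toNat ≤ 57 := hc.2
  split_ifs with h
  · exfalso; have : 65 ≤ c.toNat := h.1; omega
  · rfl

theorem digit_ne_space {c : Char} (hc : PySem.Chars.isdigit c = true) : c ≠ ' ' := by
  unfold PySem.Chars.isdigit at hc
  simp only [Bool.and_eq_true, decide_eq_true_eq, Char.le_def, UInt32.le_iff_toNat_le] at hc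
  intro he; subst he
  have h0 : (48 : Nat) ≤ 32 := hc.1
  omega

-- A's fold equals fAB, given that the accumulator's last character encodes the flag
theorem foldA_eq (cs : List Char) : ∀ (acc : List Char) (b : Bool),
    (b = true ↔ (acc = [] ∨ acc.getLast? = some ' ')) →
    cs.foldl solutionStep acc = acc ++ fAB b cs := by
  induction cs with
  | nil => intro acc b _; simp [fAB]
  | cons c cs ih =>
    intro acc b hb
    have hlast : ∀ x : Char, (acc ++ [x]).getLast? = some x := by
      intro x; simp
    have hflag : ∀ x : Char, x ≠ ' ' →
        ((false : Bool) = true ↔ (acc ++ [x] = [] ∨ (acc ++ [x]).getLast? = some ' ')) := by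
      intro x hx
      constructor
      · intro h; cases h
      · rintro (h | h)
        · exact absurd h (by simp)
        · rw [hlast] at h; exact absurd (Option.some.inj h) hx
    have hcond : ((decide (acc ≠ []) && (PySem.Chars.pyGet? acc (-1) == some ' ')) ||
        decide (acc = [])) = b := by
      cases acc with
      | nil =>
        simp only [ne_eq, not_true_eq_false, decide_false, Bool.false_and, decide_true,
          Bool.or_true]
        exact (hb.mpr (Or.inl rfl)).symm
      | cons a as =>
        have hg : PySem.Chars.pyGet? (a :: as) (-1) = (a :: as).getLast? :=
          PySem.List.pyGet?_neg_one (a :: as)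
        simp only [hg, ne_eq, reduceCtorEq, not_false_eq_true, decide_true, Bool.true_and,
          decide_false, Bool.or_false]
        by_cases hsp : (a :: as).getLast? = some ' '
        · have hbt : b = true := hb.mpr (Or.inr hsp)
          simp [hsp, hbt]
        · have hbf : b = false := by
            cases b with
            | true => exact absurd (hb.mp rfl) (by simp [hsp])
            | false => rfl
          subst hbf
          simp [hsp]
    rw [List.foldl_cons]
    by_cases hdig : PySem.Chars.isdigit c = true
    · have hc : c ≠ ' ' := digit_ne_space hdig
      have hstep : solutionStep acc c = acc ++ [c] := by
        unfold solutionStep; rw [if_pos (by simp [hdig])]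
      rw [hstep, ih (acc ++ [c]) false (hflag c hc)]
      rw [fAB, if_neg hc]
      cases b <;> simp [upperChar_digit hdig, lowerChar_digit hdig]
    · by_cases hc : c = ' '
      · subst hc
        have hstep : solutionStep acc ' ' = acc ++ [' '] := by
          unfold solutionStep; rw [if_pos (by simp)]
        rw [hstep, ih (acc ++ [' ']) true (by simp [hlast])]
        rw [fAB, if_pos rfl]
        simp
      · cases b with
        | true =>
          have hstep : solutionStep acc c = acc ++ [PySem.Chars.upperChar c] := by
            unfold solutionStep
            rw [if_neg (by simp [hdig, hc]), if_pos (by rw [hcond])]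
          rw [hstep, ih (acc ++ [PySem.Chars.upperChar c]) false (hflag _ (upperChar_ne_space hc))]
          rw [fAB, if_neg hc]
          simp
        | false =>
          have hstep : solutionStep acc c = acc ++ [PySem.Chars.lowerChar c] := by
            unfold solutionStep
            rw [if_neg (by simp [hdig, hc]), if_neg (by rw [hcond]; simp)]
          rw [hstep, ih (acc ++ [PySem.Chars.lowerChar c]) false (hflag _ (lowerChar_ne_space hc))]
          rw [fAB, if_neg hc]
          simp

-- splitOn with the single-space separator computes splitSp
theorem splitOn_go_eq (cs : List Char) : ∀ (fuel : Nat) (cur : List Char) (acc : List (List Char)),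
    cs.length ≤ fuel →
    PySem.Chars.splitOn.go [' '] fuel cs cur acc =
      acc.reverse ++ (cur.reverse ++ (splitSp cs).1) :: (splitSp cs).2 := by
  induction cs with
  | nil =>
    intro fuel cur acc _
    cases fuel <;> simp [PySem.Chars.splitOn.go, splitSp]
  | cons c cs ih =>
    intro fuel cur acc hf
    cases fuel with
    | zero => simp at hf
    | succ f =>
      have hf' : cs.length ≤ f := by simpa using hf
      rw [PySem.Chars.splitOn.go]
      by_cases hc : c = ' '
      · subst hc
        rw [if_pos (by simp [List.isPrefixOf])]
        simp only [List.length_cons, List.length_nil, List.drop_succ_cons, List.drop_zero]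
        rw [ih f [] (cur.reverse :: acc) hf']
        simp [splitSp]
      · have hc' : ¬ (' ' = c) := fun h => hc h.symm
        rw [if_neg (by simp [List.isPrefixOf, hc'])]
        rw [ih f (c :: cur) acc hf']
        simp [splitSp, hc]

theorem splitOn_eq_splitSp (cs : List Char) :
    PySem.Chars.splitOn cs [' '] = (splitSp cs).1 :: (splitSp cs).2 := by
  unfold PySem.Chars.splitOn
  rw [splitOn_go_eq cs (cs.length + 1) [] [] (by omega)]
  simp

theorem capTok_nil : capTok [] = [] := by decide

theorem capTok_cons (c : Char) (t : List Char) :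
    capTok (c :: t) = PySem.Chars.upperChar c :: PySem.Chars.lower t := by
  unfold capTok PySem.Chars.slice
  rw [PySem.List.slice_to (c :: t) (by norm_num)]
  rw [PySem.List.slice_from (c :: t) (by norm_num)]
  simp [PySem.Chars.upper]

-- fAB computes B's join-of-capitalized-tokens
theorem fAB_eq_join (cs : List Char) :
    fAB true cs = PySem.Chars.join [' '] (((splitSp cs).1 :: (splitSp cs).2).map capTok) ∧
    fAB false cs = PySem.Chars.join [' ']
      (PySem.Chars.lower (splitSp cs).1 :: (splitSp cs).2.map capTok) := by
  induction cs with
  | nil => simp [fAB, splitSp, capTok_nil, PySem.Chars.join_singleton, PySem.Chars.lower]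
  | cons c cs ih =>
    by_cases hc : c = ' '
    · subst hc
      have hs : splitSp (' ' :: cs) = ([], (splitSp cs).1 :: (splitSp cs).2) := by
        simp [splitSp]
      constructor <;>
      · rw [fAB, if_pos rfl, hs]
        simp only [List.map_cons, capTok_nil]
        rw [PySem.Chars.join_cons_cons]
        simp only [PySem.Chars.lower, List.map_nil, List.nil_append]
        rw [ih.1]
        simp
    · have hs : splitSp (c :: cs) = (c :: (splitSp cs).1, (splitSp cs).2) := by
        simp [splitSp, hc]
      constructor
      · rw [fAB, if_neg hc, if_pos rfl, ih.2, hs]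
        simp only [List.map_cons, capTok_cons]
        cases h2 : (splitSp cs).2 with
        | nil => simp [PySem.Chars.join_singleton]
        | cons q qs =>
          rw [List.map_cons, PySem.Chars.join_cons_cons, PySem.Chars.join_cons_cons]
          simp
      · rw [fAB, if_neg hc, if_neg (by simp), ih.2, hs]
        simp only [PySem.Chars.lower, List.map_cons]
        cases h2 : (splitSp cs).2 with
        | nil => simp [PySem.Chars.join_singleton]
        | cons q qs =>
          rw [List.map_cons, PySem.Chars.join_cons_cons, PySem.Chars.join_cons_cons]
          simp

-- ===== VERDICT (by name: the statement is the Claim_ definition above) =====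
theorem solution_spec : Claim_equal_solution := by
  intro s _
  unfold Spec_solution solution solution_alt
  congr 1
  rw [foldA_eq s.toList [] true (by simp)]
  rw [splitOn_eq_splitSp]
  simpa using (fAB_eq_join s.toList).1
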